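-- pv_equiv track=rewrite | github.com/StasDeep/Advent-of-Code | y2015/t11/solution.py | is_seq_valid
-- ===== SOURCE A (Python) =====
-- import string
--
-- def is_seq_valid(seq):
--     has_triples = False
--     for c1, c2, c3 in zip(seq, seq[1:], seq[2:]):
--         if c3 - c2 == 1 and c2 - c1 == 1:
--             has_triples = True
--             break
--
--     has_iol = any(stop in seq for stop in [string.ascii_lowercase.index(ch) for ch in "iol"])
--
--     num_doubles = 0
--     s = "".join(string.ascii_lowercase[i] for i in seq)
--     skip = False
--     for c1, c2 in zip(s, s[1:]):
--         if skip:
--             skip = False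
--             continue
--         if c1 == c2:
--             num_doubles += 1
--             skip = True
--
--     return has_triples and not has_iol and num_doubles >= 2
-- ===== SOURCE B (Python) =====
-- import string
--
--
-- def is_seq_valid(seq):
--     # straight-of-three via the difference sequence: needs "1" twice in a row
--     ds = [b - a for a, b in zip(seq, seq[1:])]
--     has_straight = (1, 1) in zip(ds, ds[1:])
--     no_iol = not ({8, 11, 14} & set(seq))
--     # doubles via run-length encoding: a maximal run of L equal letters
--     # contributes exactly L // 2 non-overlapping pairs
--     s = "".join(string.ascii_lowercase[i] for i in seq)
--     runs = []
--     for c in s: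
--         if runs and runs[-1][0] == c:
--             runs[-1][1] += 1
--         else:
--             runs.append([c, 1])
--     doubles = sum(n // 2 for _, n in runs)
--     return has_straight and no_iol and doubles >= 2
-- ===== Notes on version B (the rewrite author's own statement) =====
-- stated objective: alternative
-- what changed: Each rule is recast on a derived structure instead of A's stateful scans: the straight becomes membership of (1,1) in the pairedup difference sequence, the i/o/l rule a set intersection, and A's skip-flag double counter is replaced by run-length encoding with sum of run_length // 2 per maximal run.
import Mathlib
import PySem

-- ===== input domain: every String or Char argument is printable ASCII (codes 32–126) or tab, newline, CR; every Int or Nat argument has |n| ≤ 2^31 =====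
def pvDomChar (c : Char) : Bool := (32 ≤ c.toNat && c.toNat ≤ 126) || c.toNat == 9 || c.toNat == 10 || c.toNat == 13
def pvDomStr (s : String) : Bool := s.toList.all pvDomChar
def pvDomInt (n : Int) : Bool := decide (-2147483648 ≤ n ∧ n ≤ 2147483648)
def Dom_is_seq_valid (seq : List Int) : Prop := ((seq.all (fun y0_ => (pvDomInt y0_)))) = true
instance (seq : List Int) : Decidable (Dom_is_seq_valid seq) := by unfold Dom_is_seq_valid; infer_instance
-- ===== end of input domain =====

-- B recasts each rule on a derived structure instead of A's stateful scans: the straight is a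
-- pattern in the difference sequence, i/o/l is a set intersection, and the greedy double count
-- is replaced by run-length encoding (each maximal run of L letters holds L // 2 pairs).

-- ===== PORT A =====
-- string.ascii_lowercase
def pvAlphabet : List Char := "abcdefghijklmnopqrstuvwxyz".toList

-- A's first loop: 'for c1,c2,c3 in zip(...)' with break on a straight of three
def pvTriplesLoop : List ((Int × Int) × Int) → Bool
  | [] => false
  | ((c1, c2), c3) :: rest =>
      if c3 - c2 == 1 && c2 - c1 == 1 then true else pvTriplesLoop rest

-- A's third loop: skip-flag state machine over adjacent pairs of s
def pvDoublesLoop : List (Char × Char) → Bool → Int → Int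
  | [], _, n => n
  | (c1, c2) :: rest, skip, n =>
      if skip then pvDoublesLoop rest false n
      else if c1 == c2 then pvDoublesLoop rest true (n + 1)
      else pvDoublesLoop rest false n

def is_seq_valid (seq : List Int) : Bool :=
  let has_triples := pvTriplesLoop
    ((seq.zip (PySem.List.slice seq (some 1) none)).zip (PySem.List.slice seq (some 2) none))
  let has_iol := ([8, 14, 11] : List Int).any (fun stop => seq.contains stop)
  -- ascii_lowercase[i] raises IndexError when pyGet? is none; Pre_ excludes that, so no element is dropped
  let s := seq.filterMap (fun i => PySem.List.pyGet? pvAlphabet i)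
  let num_doubles := pvDoublesLoop (s.zip (PySem.List.slice s (some 1) none)) false 0
  has_triples && !has_iol && decide (num_doubles ≥ 2)

-- ===== PORT B =====
-- B's run-length loop body: 'if runs and runs[-1][0] == c: runs[-1][1] += 1 else: runs.append([c, 1])'
def pvRleStep (runs : List (Char × Int)) (c : Char) : List (Char × Int) :=
  match PySem.List.pyGet? runs (-1) with
  | some (c0, n0) => if c0 == c then runs.dropLast ++ [(c0, n0 + 1)] else runs ++ [(c, 1)]
  | none => runs ++ [(c, 1)]

def is_seq_valid_alt (seq : List Int) : Bool :=
  let ds := (seq.zip (PySem.List.slice seq (some 1) none)).map (fun p => p.2 - p.1)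
  let has_straight := (ds.zip (PySem.List.slice ds (some 1) none)).contains (((1 : Int), (1 : Int)))
  let no_iol := (PySem.Set.inter (PySem.Set.ofList ([8, 11, 14] : List Int)) seq).isEmpty
  let s := seq.filterMap (fun i => PySem.List.pyGet? pvAlphabet i)
  let runs := s.foldl pvRleStep []
  let doubles := (runs.map (fun r => PySem.Int.floordiv r.2 2)).sum
  has_straight && no_iol && decide (doubles ≥ 2)

-- ===== PRECONDITION & SPEC =====
-- Pre_ excludes exactly the inputs where A raises IndexError: an element ≥ 26 or < -26
-- makes string.ascii_lowercase[i] raise (negative indices down to -26 wrap and A returns).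
def Pre_is_seq_valid (seq : List Int) : Prop :=
  (seq.all (fun x => decide (-26 ≤ x ∧ x ≤ 25))) = true
instance (seq : List Int) : Decidable (Pre_is_seq_valid seq) := by
  unfold Pre_is_seq_valid; infer_instance

def pvWitness_is_seq_valid : List Int := [23, 24, 25, 0, 0, 1, 1]

def Spec_is_seq_valid (seq : List Int) (out : Bool) : Prop := out = is_seq_valid_alt seq
instance (seq : List Int) (out : Bool) : Decidable (Spec_is_seq_valid seq out) := by
  unfold Spec_is_seq_valid; infer_instance

-- ===== CLAIM (what is proved, stated in full; the proofs are below) =====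
def Claim_equal_is_seq_valid : Prop := ∀ (seq : List Int), Dom_is_seq_valid seq →
  Pre_is_seq_valid seq → Spec_is_seq_valid seq (is_seq_valid seq)

-- ===== LEMMAS AND PROOFS =====

-- proof-only greedy double count (the common value of the two double counters)
def pvGreedy : List Char → Int
  | c1 :: c2 :: rest => if c1 == c2 then 1 + pvGreedy rest else pvGreedy (c2 :: rest)
  | _ => 0

-- proof-only run-length tail: the runs produced from a pending run (c, n)
def pvRleAux (c : Char) (n : Int) : List Char → List (Char × Int)
  | [] => [(c, n)]
  | d :: t => if c == d then pvRleAux c (n + 1) t else (c, n) :: pvRleAux d 1 t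

-- the break-loop is 'any'
theorem pvTriplesLoop_eq_any (z : List ((Int × Int) × Int)) :
    pvTriplesLoop z = z.any (fun p => p.2 - p.1.2 == 1 && p.1.2 - p.1.1 == 1) := by
  induction z with
  | nil => rfl
  | cons p rest ih =>
      obtain ⟨⟨c1, c2⟩, c3⟩ := p
      simp only [pvTriplesLoop, List.any_cons, ← ih]
      split <;> simp_all

-- A's zip3 'any' is B's (1, 1)-membership in the difference sequence
theorem pvStraight_eq (seq : List Int) :
    ((seq.zip (seq.drop 1)).zip (seq.drop 2)).any
        (fun p => p.2 - p.1.2 == 1 && p.1.2 - p.1.1 == 1)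
      = (((seq.zip (seq.drop 1)).map (fun p => p.2 - p.1)).zip
          (((seq.zip (seq.drop 1)).map (fun p => p.2 - p.1)).drop 1)).contains
          (((1 : Int), (1 : Int))) := by
  induction seq with
  | nil => rfl
  | cons a rest ih =>
      match rest with
      | [] => rfl
      | [b] => rfl
      | b :: c :: t =>
          simp only [List.drop_succ_cons, List.drop_zero, List.zip_cons_cons, List.map_cons,
            List.any_cons, List.contains_cons] at ih ⊢
          rw [ih]
          congr 1
          rw [Bool.eq_iff_iff]
          constructor <;> (intro h; simp_all) <;> omega

-- A's 'any stop in seq' is the negation of B's empty intersection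
theorem pvIol_eq (seq : List Int) :
    (!([8, 14, 11] : List Int).any (fun stop => seq.contains stop))
      = (PySem.Set.inter (PySem.Set.ofList ([8, 11, 14] : List Int)) seq).isEmpty := by
  simp [PySem.Set.inter, PySem.Set.ofList, PySem.Set.add, PySem.Set.contains,
    List.filter]
  by_cases h8 : seq.contains 8 <;> by_cases h11 : seq.contains 11 <;>
    by_cases h14 : seq.contains 14 <;> simp_all

-- after a counted pair, the skip step consumes one pair and resets the flag
theorem pvDoubles_skip (l : List Char) (c : Char) (m : Int) :
    pvDoublesLoop ((c :: l).zip l) true m = pvDoublesLoop (l.zip (l.drop 1)) false m := by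
  cases l with
  | nil => rfl
  | cons r rs => rfl

-- A's skip-flag count is the greedy count
theorem pvDoubles_eq (s : List Char) : ∀ n : Int,
    pvDoublesLoop (s.zip (s.drop 1)) false n = n + pvGreedy s := by
  induction s using pvGreedy.induct with
  | case1 c1 c2 rest h ih =>
      intro n
      simp only [List.drop_succ_cons, List.drop_zero, List.zip_cons_cons]
      rw [show pvDoublesLoop ((c1, c2) :: (c2 :: rest).zip rest) false n
            = pvDoublesLoop ((c2 :: rest).zip rest) true (n + 1) by
          simp [pvDoublesLoop, h]]
      rw [pvDoubles_skip rest c2 (n + 1), ih (n + 1)]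
      rw [show pvGreedy (c1 :: c2 :: rest) = 1 + pvGreedy rest by
          simp [pvGreedy, h]]
      ring
  | case2 c1 c2 rest h ih =>
      intro n
      simp only [List.drop_succ_cons, List.drop_zero, List.zip_cons_cons]
      rw [show pvDoublesLoop ((c1, c2) :: (c2 :: rest).zip rest) false n
            = pvDoublesLoop ((c2 :: rest).zip rest) false n by
          simp [pvDoublesLoop, h]]
      have := ih n
      simp only [List.drop_succ_cons, List.drop_zero] at this
      rw [this]
      rw [show pvGreedy (c1 :: c2 :: rest) = pvGreedy (c2 :: rest) by
          simp [pvGreedy, h]]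
  | case3 l h =>
      intro n
      cases l with
      | nil => simp [pvDoublesLoop, pvGreedy]
      | cons a t =>
          cases t with
          | nil => simp [pvDoublesLoop, pvGreedy]
          | cons b u => exact (h a b u rfl).elim

-- B's fold from a state ending in a pending run is pvRleAux
theorem pvRleFold_eq (s : List Char) : ∀ (acc : List (Char × Int)) (c : Char) (n : Int),
    List.foldl pvRleStep (acc ++ [(c, n)]) s = acc ++ pvRleAux c n s := by
  induction s with
  | nil => intro acc c n; simp [pvRleAux]
  | cons d t ih =>
      intro acc c n
      simp only [List.foldl_cons]
      by_cases h : c == d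
      · rw [show pvRleStep (acc ++ [(c, n)]) d = acc ++ [(c, n + 1)] by
            simp [pvRleStep, PySem.List.pyGet?_neg_one_append_singleton, h]]
        rw [ih acc c (n + 1), pvRleAux]
        simp [h]
      · rw [show pvRleStep (acc ++ [(c, n)]) d = (acc ++ [(c, n)]) ++ [(d, 1)] by
            simp [pvRleStep, PySem.List.pyGet?_neg_one_append_singleton, h]]
        rw [ih (acc ++ [(c, n)]) d 1, pvRleAux]
        simp [h]

-- greedy count of a pure run
theorem pvGreedy_replicate (c : Char) : ∀ n : Nat,
    pvGreedy (List.replicate n c) = ((n / 2 : Nat) : Int) := by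
  intro n
  induction n using Nat.strong_induction_on with
  | _ n ih =>
    match n with
    | 0 => simp [pvGreedy]
    | 1 => simp [pvGreedy]
    | m + 2 =>
        rw [show List.replicate (m + 2) c = c :: c :: List.replicate m c by
            rw [List.replicate_succ, List.replicate_succ]]
        rw [show pvGreedy (c :: c :: List.replicate m c) = 1 + pvGreedy (List.replicate m c) by
            simp [pvGreedy]]
        rw [ih m (by omega)]
        have : (m + 2) / 2 = m / 2 + 1 := by omega
        rw [this]; push_cast; ring

-- greedy count of a run followed by a different letter
theorem pvGreedy_replicate_prefix (c d : Char) (t : List Char) (hcd : ¬ c == d) : ∀ n : Nat,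
    pvGreedy (List.replicate n c ++ d :: t) = ((n / 2 : Nat) : Int) + pvGreedy (d :: t) := by
  intro n
  induction n using Nat.strong_induction_on with
  | _ n ih =>
    match n with
    | 0 => simp
    | 1 =>
        rw [show List.replicate 1 c ++ d :: t = c :: d :: t by simp]
        rw [show pvGreedy (c :: d :: t) = pvGreedy (d :: t) by simp [pvGreedy, hcd]]
        simp
    | m + 2 =>
        rw [show List.replicate (m + 2) c ++ d :: t
              = c :: c :: (List.replicate m c ++ d :: t) by
            rw [List.replicate_succ, List.replicate_succ]; simp]
        rw [show pvGreedy (c :: c :: (List.replicate m c ++ d :: t))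
              = 1 + pvGreedy (List.replicate m c ++ d :: t) by simp [pvGreedy]]
        rw [ih m (by omega)]
        have : (m + 2) / 2 = m / 2 + 1 := by omega
        rw [this]; push_cast; ring

-- the summed run-length doubles equal the greedy count
theorem pvRleAux_sum (s : List Char) : ∀ (c : Char) (n : Nat),
    ((pvRleAux c ((n : Int) + 1) s).map (fun r => PySem.Int.floordiv r.2 2)).sum
      = pvGreedy (List.replicate (n + 1) c ++ s) := by
  induction s with
  | nil =>
      intro c n
      rw [pvRleAux]
      simp only [List.map_cons, List.map_nil, List.sum_cons, List.sum_nil, List.append_nil]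
      rw [show ((n : Int) + 1) = (((n + 1 : Nat)) : Int) by omega]
      rw [show PySem.Int.floordiv (((n + 1 : Nat)) : Int) 2 = (((n + 1) / 2 : Nat) : Int) by
        exact_mod_cast PySem.Int.floordiv_natCast (n + 1) 2]
      rw [pvGreedy_replicate c (n + 1)]
      ring
  | cons d t ih =>
      intro c n
      rw [pvRleAux]
      by_cases h : c == d
      · rw [if_pos h]
        have hd : d = c := (eq_of_beq h).symm
        rw [show ((n : Int) + 1 + 1) = (((n + 1 : Nat) : Int) + 1) by omega]
        rw [ih c (n + 1)]
        congr 1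
        rw [hd, show List.replicate (n + 1) c ++ c :: t
              = (List.replicate (n + 1) c ++ [c]) ++ t by simp]
        rw [← List.replicate_succ']
      · rw [if_neg h]
        simp only [List.map_cons, List.sum_cons]
        have h0 := ih d 0
        simp only [Nat.cast_zero, zero_add, List.replicate_one, List.singleton_append] at h0
        rw [h0]
        rw [show ((n : Int) + 1) = (((n + 1 : Nat)) : Int) by omega]
        rw [show PySem.Int.floordiv (((n + 1 : Nat)) : Int) 2 = (((n + 1) / 2 : Nat) : Int) by
          exact_mod_cast PySem.Int.floordiv_natCast (n + 1) 2]
        rw [pvGreedy_replicate_prefix c d t h (n + 1)]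

-- B's summed doubles equal A's greedy count, for every letter list
theorem pvRle_doubles_eq (s : List Char) :
    (((List.foldl pvRleStep [] s).map (fun r => PySem.Int.floordiv r.2 2)).sum) = pvGreedy s := by
  cases s with
  | nil => simp [pvGreedy]
  | cons c t =>
      rw [show List.foldl pvRleStep [] (c :: t) = List.foldl pvRleStep ([] ++ [(c, 1)]) t by
        simp [pvRleStep, PySem.List.pyGet?]]
      rw [pvRleFold_eq t [] c 1]
      have := pvRleAux_sum t c 0
      simp only [Nat.cast_zero, zero_add] at this
      rw [List.nil_append, this]
      simp

-- ===== VERDICT (by name: the statement is the Claim_ definition above) =====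
theorem is_seq_valid_spec : Claim_equal_is_seq_valid := by
  intro seq _ _
  unfold Spec_is_seq_valid is_seq_valid is_seq_valid_alt
  have h1 : ∀ {α : Type} (xs : List α), PySem.List.slice xs (some 1) none = xs.drop 1 := by
    intro α xs
    rw [show (1 : Int) = ((1 : Nat) : Int) by simp, PySem.List.slice_from_natCast]
  have h2 : ∀ {α : Type} (xs : List α), PySem.List.slice xs (some 2) none = xs.drop 2 := by
    intro α xs
    rw [show (2 : Int) = ((2 : Nat) : Int) by simp, PySem.List.slice_from_natCast]
  simp only [h1, h2, pvTriplesLoop_eq_any, pvStraight_eq, pvDoubles_eq _ 0, zero_add,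
    pvRle_doubles_eq, pvIol_eq]
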